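-- pv_equiv track=rewrite | github.com/d13kotson/Tabletop_Unity | django/ptu/models.py | exp_to_level
-- ===== SOURCE A (Python) =====
-- from math import floor
--
-- def exp_to_level(level):
--     factor = floor(level / 10)
--     remainder = level % 10
--     experience = 0
--     for i in range(factor):
--         experience += 100 * (2 ** i)
--     for i in range(remainder):
--         experience += 10 * (2 ** factor)
--     return experience
-- ===== SOURCE B (Python) =====
-- def exp_to_level(level):
--     factor, remainder = divmod(level, 10)
--     p = 1 << factor
--     return 100 * (p - 1) + remainder * 10 * p
-- ===== Notes on version B (the rewrite author's own statement) =====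
-- stated objective: faster
-- what changed: Replaces the two accumulation loops (a geometric-series loop plus a constant-increment loop) by a closed form 100*(2^factor-1) + remainder*10*2^factor computed with a single shift.
-- outside the precondition, e.g. on exp_to_level(-10): A returns 0, B raises ValueError
import Mathlib
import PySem

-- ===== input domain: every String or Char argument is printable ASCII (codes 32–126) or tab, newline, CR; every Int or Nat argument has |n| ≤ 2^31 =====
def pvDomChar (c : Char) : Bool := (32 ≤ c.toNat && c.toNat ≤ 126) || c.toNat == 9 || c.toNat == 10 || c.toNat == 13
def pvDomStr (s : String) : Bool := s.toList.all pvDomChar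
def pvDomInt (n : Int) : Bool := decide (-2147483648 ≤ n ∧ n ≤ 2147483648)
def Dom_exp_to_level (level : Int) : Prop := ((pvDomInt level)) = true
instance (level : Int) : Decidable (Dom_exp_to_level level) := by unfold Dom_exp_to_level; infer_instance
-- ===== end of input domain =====

-- B replaces A's two accumulation loops by the closed form 100*(2^factor-1) + remainder*10*2^factor (one shift): asymptotically faster.
-- Pre_ excludes negative levels: there A returns a float (non-int) except at negative multiples of 10 (where it returns 0), while B's shift 1 << factor raises ValueError for negative factor.


-- ===== PORT A =====
-- floor(level / 10): for |level| ≤ 2^31 the float division is exact enough that this equals floor division.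
def exp_to_level (level : Int) : Int :=
  let factor := PySem.Int.floordiv level 10
  let remainder := PySem.Int.mod level 10
  let experience : Int := 0
  let experience := (PySem.List.pyRange 0 factor 1).foldl
    (fun acc i => acc + 100 * 2 ^ i.toNat) experience   -- 2 ** i, i ≥ 0 in the range
  (PySem.List.pyRange 0 remainder 1).foldl
    (fun acc _ => acc + 10 * 2 ^ factor.toNat) experience -- 2 ** factor, factor ≥ 0 under Pre_

-- ===== PORT B =====
def exp_to_level_alt (level : Int) : Int :=
  let factor := PySem.Int.floordiv level 10
  let remainder := PySem.Int.mod level 10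
  let p : Int := 2 ^ factor.toNat   -- 1 << factor, factor ≥ 0 under Pre_
  100 * (p - 1) + remainder * 10 * p

-- ===== PRECONDITION & SPEC =====
-- Pre_ excludes level < 0: A returns a float there (not an int), except at negative multiples
-- of 10 where it returns 0 but B's 1 << factor raises ValueError (see claim cites).
def Pre_exp_to_level (level : Int) : Prop := 0 ≤ level
instance (level : Int) : Decidable (Pre_exp_to_level level) := by unfold Pre_exp_to_level; infer_instance
def pvWitness_exp_to_level : Int := (23)

def Spec_exp_to_level (level : Int) (out : Int) : Prop := out = exp_to_level_alt level
instance (level : Int) (out : Int) : Decidable (Spec_exp_to_level level out) := by unfold Spec_exp_to_level; infer_instance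

-- ===== CLAIM (what is proved, stated in full; the proofs are below) =====
def Claim_equal_exp_to_level : Prop := ∀ (level : Int), Dom_exp_to_level level → Pre_exp_to_level level → Spec_exp_to_level level (exp_to_level level)

-- ===== LEMMAS AND PROOFS =====

-- first loop: geometric series
theorem pv_loop1 (n : Nat) (e : Int) :
    (PySem.List.pyRange 0 (n : Int) 1).foldl (fun acc i => acc + 100 * 2 ^ i.toNat) e
      = e + 100 * (2 ^ n - 1) := by
  induction n generalizing e with
  | zero => simp [PySem.List.pyRange_one_eq_nil]
  | succ m ih =>
    have h : ((m + 1 : Nat) : Int) = (m : Int) + 1 := by push_cast; ring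
    rw [h, PySem.List.pyRange_one_succ_right (by positivity), List.foldl_append, ih]
    simp only [List.foldl]
    have : ((m : Int)).toNat = m := by omega
    rw [this]
    ring

-- second loop: constant increment
theorem pv_loop2 (n : Nat) (c e : Int) :
    (PySem.List.pyRange 0 (n : Int) 1).foldl (fun acc _ => acc + c) e = e + n * c := by
  induction n generalizing e with
  | zero => simp [PySem.List.pyRange_one_eq_nil]
  | succ m ih =>
    have h : ((m + 1 : Nat) : Int) = (m : Int) + 1 := by push_cast; ring
    rw [h, PySem.List.pyRange_one_succ_right (by positivity), List.foldl_append, ih]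
    simp only [List.foldl]
    ring

-- ===== VERDICT (by name: the statement is the Claim_ definition above) =====
theorem exp_to_level_spec : Claim_equal_exp_to_level := by
  intro level _ hpre
  unfold Spec_exp_to_level exp_to_level exp_to_level_alt
  have hf : 0 ≤ PySem.Int.floordiv level 10 := by
    rw [PySem.Int.floordiv_eq_ediv_of_pos (by norm_num)]
    exact Int.ediv_nonneg hpre (by norm_num)
  have hr : 0 ≤ PySem.Int.mod level 10 := by
    rw [PySem.Int.mod_eq_emod_of_pos (by norm_num)]
    exact Int.emod_nonneg level (by norm_num)
  set f := PySem.Int.floordiv level 10 with hfdef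
  set r := PySem.Int.mod level 10 with hrdef
  have hfc : f = ((f.toNat : Nat) : Int) := by omega
  have hrc : r = ((r.toNat : Nat) : Int) := by omega
  simp only
  rw [hfc, hrc, pv_loop1, pv_loop2]
  have h1 : (((f.toNat : Nat) : Int)).toNat = f.toNat := by omega
  rw [h1]
  push_cast [← hrc]
  ring
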